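-- pv_equiv track=rewrite | github.com/winckey/Python | 프로그래머스/[PCCP 모의고사 #1] 체육대회 다른풀이2.py | solution
-- ===== SOURCE A (Python) =====
-- from itertools import combinations, permutations
--
-- def solution(ability):
--     n, m = len(ability), len(ability[0])
--     stu = list(combinations(range(n), m))
--     grade = list(permutations(range(m)))
--     max_v = 0
--     for i in stu:
--         for j in grade:
--             temp = 0
--             for k in range(m):
--                 x, y = i[k], j[k]
--                 temp += ability[x][y]
--             max_v = max(max_v, temp)
--
--     return max_v
-- ===== SOURCE B (Python) =====
-- def solution(ability):
--     n, m = len(ability), len(ability[0])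
--     if m > n:
--         return 0
--     size = 1 << m
--     full = size - 1
--     # dp[mask] = best total when the events whose bit is CLEAR in mask are still
--     # to be assigned among the students not yet processed; None = impossible.
--     dp = [None] * full + [0]
--     for row in reversed(ability):
--         ndp = []
--         for mask in range(size):
--             if mask == full:
--                 ndp.append(0)
--                 continue
--             res = dp[mask]
--             for j in range(m):
--                 if (mask >> j) & 1 == 0:
--                     sub = dp[mask | (1 << j)]
--                     if sub is not None:
--                         cand = row[j] + sub
--                         if res is None or cand > res:
--                             res = cand
--             ndp.append(res)
--         dp = ndp
--     r = dp[0]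
--     return 0 if r is None else max(0, r)
-- ===== Notes on version B (the rewrite author's own statement) =====
-- stated objective: faster
-- what changed: Replaces A's brute-force enumeration of all C(n,m) student subsets times all m! event permutations with a bitmask dynamic program over event subsets, sweeping the students once (two-array DP, infeasible states as None).
import Mathlib
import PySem

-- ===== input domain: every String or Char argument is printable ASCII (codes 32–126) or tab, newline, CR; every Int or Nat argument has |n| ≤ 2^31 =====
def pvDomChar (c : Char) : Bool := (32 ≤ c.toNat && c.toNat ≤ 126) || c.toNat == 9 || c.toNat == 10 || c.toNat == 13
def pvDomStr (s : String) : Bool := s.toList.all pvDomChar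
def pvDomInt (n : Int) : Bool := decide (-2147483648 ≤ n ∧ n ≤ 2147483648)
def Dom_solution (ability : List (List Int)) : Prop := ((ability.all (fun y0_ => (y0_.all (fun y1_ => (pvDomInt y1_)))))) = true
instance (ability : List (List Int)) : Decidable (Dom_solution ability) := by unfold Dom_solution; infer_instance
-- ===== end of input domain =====

-- B replaces A's enumeration of all C(n,m)·m! assignments with a bitmask DP over event
-- subsets (one sweep over the students): an asymptotically faster exact algorithm.


-- ===== PORT A =====
-- Transliteration of A: enumerate combinations of m student indices × permutations of the
-- m events, running maximum starting from 0.  ability[0] is ported as pyGetD with default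
-- [] and the entry reads ability[x][y] as pyGetD with default 0: exact wherever Python A
-- does not raise (= inside Pre_solution).
def solution (ability : List (List Int)) : Int :=
  let n : Nat := ability.length
  let m : Nat := (PySem.List.pyGetD ability 0 []).length
  let stu := PySem.List.combinations (PySem.List.pyRange 0 (n : Int) 1) m
  let grade := PySem.List.permutations (PySem.List.pyRange 0 (m : Int) 1) m
  stu.foldl (fun max_v i =>
    grade.foldl (fun max_v j =>
      let temp := (PySem.List.pyRange 0 (m : Int) 1).foldl (fun temp k =>
        let x := PySem.List.pyGetD i k 0
        let y := PySem.List.pyGetD j k 0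
        temp + PySem.List.pyGetD (PySem.List.pyGetD ability x []) y 0) 0
      max max_v temp) max_v) 0

-- ===== PORT B =====
-- Transliteration of Source B: dp[mask] = best total assigning the events with CLEAR bit in
-- mask among the students not yet processed (None = impossible); students swept in reverse,
-- each round rebuilds the dp list (Python's per-mask ndp.append loop = map over range(size)).
-- '(mask >> j) & 1 == 0' is Nat.testBit mask j = false; dp[i] (index always < size in Source B)
-- is List.getD with default none.
def solution_alt (ability : List (List Int)) : Int :=
  let n : Nat := ability.length
  let m : Nat := (PySem.List.pyGetD ability 0 []).length
  if m > n then 0 else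
  let size : Nat := 1 <<< m
  let full : Nat := size - 1
  let dp0 : List (Option Int) := List.replicate full none ++ [some 0]
  let dp := ability.reverse.foldl (fun dp row =>
    (List.range size).map (fun mask =>
      if mask = full then some (0:Int)
      else
        (List.range m).foldl (fun res j =>
          if mask.testBit j = false then
            match dp.getD (mask ||| (1 <<< j)) none with
            | none => res
            | some sub =>
              let cand := PySem.List.pyGetD row (j : Int) 0 + sub
              match res with
              | none => some cand
              | some v => if cand > v then some cand else some v
          else res) (dp.getD mask none))) dp0
  match dp.getD 0 none with
  | none => 0
  | some r => max 0 r

-- ===== PRECONDITION & SPEC =====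
-- Pre_solution = exactly the inputs where Python A returns: ability nonempty (A indexes
-- ability[0]), and when 1 ≤ m ≤ n (only then does A's loop index into every row) every
-- row must have at least m entries, else A raises IndexError.
def Pre_solution (ability : List (List Int)) : Prop :=
  ability ≠ [] ∧
  ((1 ≤ (ability.headD []).length ∧ (ability.headD []).length ≤ ability.length) →
    ∀ row ∈ ability, (ability.headD []).length ≤ row.length)
instance (ability : List (List Int)) : Decidable (Pre_solution ability) := by
  unfold Pre_solution; infer_instance
def pvWitness_solution : List (List Int) := [[1, 2], [3, 4]]

def Spec_solution (ability : List (List Int)) (out : Int) : Prop := out = solution_alt ability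
instance (ability : List (List Int)) (out : Int) : Decidable (Spec_solution ability out) := by unfold Spec_solution; infer_instance

-- ===== CLAIM (what is proved, stated in full; the proofs are below) =====
def Claim_equal_solution : Prop := ∀ (ability : List (List Int)), Dom_solution ability → Pre_solution ability → Spec_solution ability (solution ability)

-- ===== LEMMAS AND PROOFS =====

def omax : Option Int → Option Int → Option Int
  | none, b => b
  | some x, none => some x
  | some x, some y => some (max x y)
theorem omax_none_right (a : Option Int) : omax a none = a := by cases a <;> rfl
theorem omax_comm (a b : Option Int) : omax a b = omax b a := by
  cases a <;> cases b <;> simp [omax, max_comm]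
theorem omax_assoc (a b c : Option Int) : omax (omax a b) c = omax a (omax b c) := by
  cases a <;> cases b <;> cases c <;> simp [omax, max_assoc]
theorem omax_left_comm (a b c : Option Int) : omax a (omax b c) = omax b (omax a c) := by
  rw [← omax_assoc, omax_comm a b, omax_assoc]
def oMaxList (l : List Int) : Option Int := l.foldr (fun s acc => omax (some s) acc) none
def S (rs : List (List Int)) (p : List Int) : Int :=
  ((rs.zip p).map (fun q => PySem.List.pyGetD q.1 q.2 0)).sum
def G : List (List Int) → List Int → Option Int
  | _, [] => some 0
  | [], _ :: _ => none
  | r :: rest, e :: t =>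
    (List.range (e :: t).length).foldl
      (fun res i => omax res (Option.map
        (fun sub => PySem.List.pyGetD r ((e :: t).getD i 0) 0 + sub)
        (G rest ((e :: t).eraseIdx i))))
      (G rest (e :: t))
theorem oMaxList_append (l1 l2 : List Int) :
    oMaxList (l1 ++ l2) = omax (oMaxList l1) (oMaxList l2) := by
  induction l1 with
  | nil => rfl
  | cons s l ih => simp [oMaxList, List.foldr_cons] at ih ⊢; rw [ih, omax_assoc]
theorem oMaxList_map_add (c : Int) (l : List Int) :
    oMaxList (l.map (fun x => c + x)) = (oMaxList l).map (fun x => c + x) := by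
  induction l with
  | nil => rfl
  | cons s l ih =>
    simp [oMaxList, List.foldr_cons] at ih ⊢
    rw [ih]
    cases h : (l.foldr (fun s acc => omax (some s) acc) none) <;>
      simp [omax, max_add_add_left]

/-- running max of `u` over a list (`none` = empty). -/
def bigOmax {α : Type} (l : List α) (u : α → Option Int) : Option Int :=
  l.foldr (fun x acc => omax (u x) acc) none

theorem oMaxList_flatMap {α : Type} (g : α → List Int) (l : List α) :
    oMaxList (l.flatMap g) = bigOmax l (fun x => oMaxList (g x)) := by
  induction l with
  | nil => rfl
  | cons a l ih => simp only [List.flatMap_cons, oMaxList_append, ih, bigOmax, List.foldr_cons]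

theorem bigOmax_split {α : Type} (u v : α → Option Int) (l : List α) :
    bigOmax l (fun x => omax (u x) (v x)) = omax (bigOmax l u) (bigOmax l v) := by
  induction l with
  | nil => rfl
  | cons a l ih =>
    simp only [bigOmax, List.foldr_cons] at ih ⊢
    rw [ih, omax_assoc, omax_left_comm (v a), ← omax_assoc]

theorem bigOmax_congr {α : Type} {l : List α} {u v : α → Option Int}
    (h : ∀ x ∈ l, u x = v x) : bigOmax l u = bigOmax l v := by
  induction l with
  | nil => rfl
  | cons a l ih =>
    simp only [bigOmax, List.foldr_cons] at ih ⊢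
    rw [h a (List.mem_cons_self), ih (fun x hx => h x (List.mem_cons_of_mem a hx))]

theorem bigOmax_none {α : Type} (l : List α) : bigOmax l (fun _ => none) = none := by
  induction l with
  | nil => rfl
  | cons a l ih => simp only [bigOmax, List.foldr_cons] at ih ⊢; rw [ih]; rfl

theorem bigOmax_swap {α β : Type} (u : α → β → Option Int) (l1 : List α) (l2 : List β) :
    bigOmax l1 (fun a => bigOmax l2 (fun b => u a b))
      = bigOmax l2 (fun b => bigOmax l1 (fun a => u a b)) := by
  induction l1 with
  | nil => rw [show (fun b => bigOmax ([] : List α) (fun a => u a b)) = fun _ => none from rfl,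
      bigOmax_none]; rfl
  | cons a l ih =>
    show omax (bigOmax l2 (fun b => u a b)) (bigOmax l (fun a => bigOmax l2 (fun b => u a b))) = _
    rw [ih, ← bigOmax_split]
    rfl

theorem omax_map_add (c : Int) (a b : Option Int) :
    omax (a.map (fun y => c + y)) (b.map (fun y => c + y))
      = (omax a b).map (fun y => c + y) := by
  cases a <;> cases b <;> simp [omax]

theorem bigOmax_map_add {α : Type} (c : Int) (u : α → Option Int) (l : List α) :
    bigOmax l (fun x => (u x).map (fun y => c + y))
      = (bigOmax l u).map (fun y => c + y) := by
  induction l with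
  | nil => rfl
  | cons a l ih =>
    show omax ((u a).map _) (bigOmax l (fun x => (u x).map (fun y => c + y))) = _
    rw [ih]
    exact omax_map_add c (u a) (bigOmax l u)

theorem foldl_omax_eq {α : Type} (W : α → Option Int) (l : List α) (init : Option Int) :
    l.foldl (fun res x => omax res (W x)) init = omax init (bigOmax l W) := by
  induction l generalizing init with
  | nil => simp [bigOmax, omax_none_right]
  | cons a l ih =>
    simp only [List.foldl_cons, bigOmax, List.foldr_cons, ih]
    rw [omax_assoc]

theorem foldl_max_eq_oMaxList (l : List Int) (a : Int) :
    l.foldl (fun acc s => max acc s) a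
      = match oMaxList l with | none => a | some v => max a v := by
  induction l generalizing a with
  | nil => rfl
  | cons s l ih =>
    simp only [List.foldl_cons, ih, oMaxList, List.foldr_cons]
    cases h : (l.foldr (fun s acc => omax (some s) acc) none) <;> simp [omax, max_assoc]

/-- the candidate lists of `itertools.permutations`' first step (proof-layer name). -/
def permPick {α : Type} (xs : List α) (r : Nat) (i : Nat) : List (List α) :=
  match xs[i]? with
  | none => []
  | some x => (PySem.List.permutations (xs.eraseIdx i) r).map (x :: ·)

theorem perm_succ {α : Type} (xs : List α) (r : Nat) :
    PySem.List.permutations xs (r + 1)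
      = (List.range xs.length).flatMap (permPick xs r) := by
  rw [PySem.List.permutations]
  rfl

theorem main_ident (rows : List (List Int)) (es : List Int) :
    oMaxList ((PySem.List.combinations rows es.length).flatMap
      (fun rs => (PySem.List.permutations es es.length).map (fun p => S rs p)))
      = G rows es := by
  induction rows generalizing es with
  | nil =>
    cases es with
    | nil => rfl
    | cons e t =>
      rw [List.length_cons, PySem.List.combinations_nil_succ]
      rfl
  | cons r rest ih =>
    cases es with
    | nil => rfl
    | cons e t =>
      simp only [List.length_cons]
      rw [PySem.List.combinations_cons_succ, List.flatMap_append, oMaxList_append,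
        List.flatMap_map]
      have hQ : oMaxList ((PySem.List.combinations rest (t.length + 1)).flatMap
          (fun rs => (PySem.List.permutations (e :: t) (t.length + 1)).map (fun p => S rs p)))
          = G rest (e :: t) := by
        have h := ih (e :: t); simp only [List.length_cons] at h; exact h
      have hperm : PySem.List.permutations (e :: t) (t.length + 1)
          = (List.range (t.length + 1)).flatMap (permPick (e :: t) t.length) := by
        have h := perm_succ (e :: t) t.length
        simpa using h
      have hP : oMaxList ((PySem.List.combinations rest t.length).flatMap
          (fun c => (PySem.List.permutations (e :: t) (t.length + 1)).map (fun p => S (r :: c) p)))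
          = bigOmax (List.range (t.length + 1)) (fun i =>
              Option.map (fun sub => PySem.List.pyGetD r ((e :: t).getD i 0) 0 + sub)
                (G rest ((e :: t).eraseIdx i))) := by
        rw [hperm, oMaxList_flatMap]
        rw [bigOmax_congr (v := fun c => bigOmax (List.range (t.length + 1)) (fun i =>
            oMaxList ((permPick (e :: t) t.length i).map (fun p => S (r :: c) p))))
          (fun c _ => by rw [List.map_flatMap, oMaxList_flatMap])]
        rw [bigOmax_swap]
        apply bigOmax_congr
        intro i hi
        have hiL : i < (e :: t).length := by simpa using List.mem_range.mp hi
        have hgd : (e :: t).getD i 0 = (e :: t)[i] := List.getD_eq_getElem _ _ hiL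
        have hstep : ∀ c : List (List Int),
            oMaxList ((permPick (e :: t) t.length i).map (fun p => S (r :: c) p))
            = (oMaxList ((PySem.List.permutations ((e :: t).eraseIdx i) t.length).map
                (fun p => S c p))).map (fun x => PySem.List.pyGetD r ((e :: t)[i]) 0 + x) := by
          intro c
          rw [show permPick (e :: t) t.length i
              = (PySem.List.permutations ((e :: t).eraseIdx i) t.length).map ((e :: t)[i] :: ·) by
            simp only [permPick, List.getElem?_eq_getElem hiL]]
          rw [← oMaxList_map_add, List.map_map, List.map_map]
          congr 1
        rw [bigOmax_congr (v := fun c => (oMaxList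
            ((PySem.List.permutations ((e :: t).eraseIdx i) t.length).map (fun p => S c p))).map
              (fun x => PySem.List.pyGetD r ((e :: t)[i]) 0 + x))
          (fun c _ => hstep c)]
        rw [bigOmax_map_add]
        have hlen : ((e :: t).eraseIdx i).length = t.length := by
          rw [List.length_eraseIdx_of_lt hiL]; rfl
        have hIH : bigOmax (PySem.List.combinations rest t.length) (fun c =>
            oMaxList ((PySem.List.permutations ((e :: t).eraseIdx i) t.length).map
              (fun p => S c p)))
            = G rest ((e :: t).eraseIdx i) := by
          have h2 := ih ((e :: t).eraseIdx i)
          rw [hlen] at h2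
          rw [← oMaxList_flatMap]
          exact h2
        rw [hIH, hgd]
      rw [hQ, hP]
      show _ = (List.range (e :: t).length).foldl _ _
      rw [foldl_omax_eq, omax_comm]
      rfl

theorem map_range_zip (F : Int → Int → Int) :
    ∀ (c p : List Int), p.length = c.length →
    (List.range c.length).map (fun k => F (c.getD k 0) (p.getD k 0))
      = (c.zip p).map (fun q => F q.1 q.2) := by
  intro c
  induction c with
  | nil => intro p h; simp
  | cons a c ih =>
    intro p h
    cases p with
    | nil => simp at h
    | cons b p =>
      simp only [List.length_cons, List.range_succ_eq_map, List.map_cons, List.map_map,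
        List.zip_cons_cons]
      simp only [List.getD_cons_zero]
      congr 1
      rw [← ih p (by simpa using h)]
      apply List.map_congr_left
      intro k hk
      simp

theorem solution_eq_oMaxList (ability : List (List Int)) :
    solution ability
      = (match oMaxList ((PySem.List.combinations ability
            ((PySem.List.pyGetD ability 0 []).length)).flatMap
          (fun rs => (PySem.List.permutations
              (PySem.List.pyRange 0 ((PySem.List.pyGetD ability 0 []).length : Int) 1)
              ((PySem.List.pyGetD ability 0 []).length)).map (fun p => S rs p))) with
        | none => 0
        | some v => max 0 v) := by
  unfold solution
  set m := (PySem.List.pyGetD ability 0 []).length with hm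
  set grade := PySem.List.permutations (PySem.List.pyRange 0 (m : Int) 1) m with hg
  -- inner loop = fold over mapped list, nested loops = fold over flatMap
  have step1 : ∀ (init : Int),
      (PySem.List.combinations (PySem.List.pyRange 0 (ability.length : Int) 1) m).foldl
        (fun max_v i => grade.foldl (fun max_v j =>
          max max_v ((PySem.List.pyRange 0 (m : Int) 1).foldl (fun temp k =>
            temp + PySem.List.pyGetD (PySem.List.pyGetD ability (PySem.List.pyGetD i k 0) [])
              (PySem.List.pyGetD j k 0) 0) 0)) max_v) init
      = ((PySem.List.combinations (PySem.List.pyRange 0 (ability.length : Int) 1) m).flatMap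
          (fun i => grade.map (fun j =>
            (PySem.List.pyRange 0 (m : Int) 1).foldl (fun temp k =>
              temp + PySem.List.pyGetD (PySem.List.pyGetD ability (PySem.List.pyGetD i k 0) [])
                (PySem.List.pyGetD j k 0) 0) 0))).foldl (fun acc s => max acc s) init := by
    intro init
    rw [List.foldl_flatMap]
    congr 1
    funext acc c
    rw [List.foldl_map]
  rw [step1, foldl_max_eq_oMaxList]
  congr 1
  -- now rewrite the list of sums
  have habl : PySem.List.combinations ability m
      = (PySem.List.combinations (PySem.List.pyRange 0 (ability.length : Int) 1) m).map
          (List.map (fun x => PySem.List.pyGetD ability x [])) := by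
    have hrw : ability = (PySem.List.pyRange 0 (ability.length : Int) 1).map
        (fun j => PySem.List.pyGetD ability j []) := by
      rw [show ((ability.length : Int)) = PySem.List.len ability from rfl,
        PySem.List.map_pyGetD_pyRange_zero]
    conv_lhs => rw [hrw]
    exact PySem.List.combinations_map _ _ _
  rw [habl, List.flatMap_map]
  congr 1
  apply List.flatMap_congr
  intro c hc
  apply List.map_congr_left
  intro p hp
  -- temp = S (c.map rowOf) p
  have hcl : c.length = m := PySem.List.length_of_mem_combinations hc
  have hpl : p.length = m := by
    have h1 : p.Perm (PySem.List.pyRange 0 (m : Int) 1) := by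
      apply PySem.List.perm_of_mem_permutations
      have : (PySem.List.pyRange 0 (m : Int) 1).length = m := by
        simp [PySem.List.length_pyRange_one]
      rwa [this]
    simpa [PySem.List.length_pyRange_one] using h1.length_eq
  rw [PySem.List.foldl_add, zero_add, PySem.List.pyRange_zero_nat, List.map_map]
  have : ((fun k => PySem.List.pyGetD (PySem.List.pyGetD ability (PySem.List.pyGetD c k 0) [])
        (PySem.List.pyGetD p k 0) 0) ∘ fun (k : Nat) => (k : Int))
      = fun (k : Nat) => (fun x y => PySem.List.pyGetD (PySem.List.pyGetD ability x []) y 0)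
          (c.getD k 0) (p.getD k 0) := by
    funext k
    simp [PySem.List.pyGetD_natCast]
  rw [this, ← hcl, map_range_zip (fun x y => PySem.List.pyGetD (PySem.List.pyGetD ability x []) y 0) c p (by omega)]
  unfold S
  rw [List.zip_map_left, List.map_map]
  rfl

def freeN (m mask : Nat) : List Nat := (List.range m).filter (fun j => !mask.testBit j)
theorem freeN_full_iff (m mask : Nat) (h : mask < 2 ^ m) :
    freeN m mask = [] ↔ mask = 2 ^ m - 1 := by
  simp only [freeN, List.filter_eq_nil_iff, List.mem_range, Bool.not_eq_eq_eq_not, Bool.not_true, Bool.not_eq_false]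
  constructor
  · intro hall
    apply Nat.eq_of_testBit_eq
    intro i
    rw [Nat.testBit_two_pow_sub_one]
    by_cases hi : i < m
    · simp [hi, hall i hi]
    · have : mask < 2 ^ i := lt_of_lt_of_le h (Nat.pow_le_pow_right (by norm_num) (by omega))
      simp [hi, Nat.testBit_lt_two_pow this]
  · intro he j hj
    subst he
    simp [Nat.testBit_two_pow_sub_one, hj]
theorem freeN_or (m mask j : Nat) (hj : j < m) (hb : mask.testBit j = false) :
    freeN m (mask ||| (1 <<< j)) = (freeN m mask).erase j := by
  rw [freeN, freeN, List.Nodup.erase_eq_filter (List.Nodup.filter _ (List.nodup_range)), List.filter_filter]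
  apply List.filter_congr
  intro x hx
  rw [Nat.one_shiftLeft, Nat.testBit_or, Nat.testBit_two_pow]
  by_cases hxj : x = j
  · subst hxj; simp [hb]
  · simp [hxj, Ne.symm hxj]

def freeL (m mask : Nat) : List Int := (freeN m mask).map (fun (j : Nat) => (j : Int))

theorem freeN_zero (m : Nat) : freeN m 0 = List.range m := by
  simp [freeN]

theorem foldl_range_getD {α : Type} (k : α → Int → α) (d : Int) :
    ∀ (es : List Int) (init : α),
    (List.range es.length).foldl (fun a i => k a (es.getD i d)) init = es.foldl k init := by
  intro es
  induction es with
  | nil => intro init; rfl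
  | cons e t ih =>
    intro init
    rw [List.length_cons, List.range_succ_eq_map, List.foldl_cons, List.foldl_map]
    simp only [List.getD_cons_zero, List.getD_cons_succ]
    exact ih (k init e)

-- G's step fold, in element form, over a nodup event list
theorem G_cons_eq (r : List Int) (rest : List (List Int)) (es : List Int)
    (hne : es ≠ []) (hnd : es.Nodup) :
    G (r :: rest) es
      = es.foldl (fun res e => omax res (Option.map
          (fun sub => PySem.List.pyGetD r e 0 + sub) (G rest (es.erase e))))
        (G rest es) := by
  obtain ⟨e, t, rfl⟩ : ∃ e t, es = e :: t := by
    cases es with | nil => exact absurd rfl hne | cons e t => exact ⟨e, t, rfl⟩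
  show (List.range (e :: t).length).foldl _ _ = _
  rw [PySem.List.foldl_congr_mem (g := fun res i => omax res (Option.map
      (fun sub => PySem.List.pyGetD r ((e :: t).getD i 0) 0 + sub)
      (G rest ((e :: t).erase ((e :: t).getD i 0)))))]
  · exact foldl_range_getD (fun res x => omax res (Option.map
      (fun sub => PySem.List.pyGetD r x 0 + sub) (G rest ((e :: t).erase x)))) 0 (e :: t) _
  · intro acc i hi
    rw [List.mem_range] at hi
    have h1 : (e :: t).getD i 0 = (e :: t)[i] := List.getD_eq_getElem _ _ hi
    rw [h1, List.Nodup.erase_getElem hnd i hi]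

theorem freeL_nodup (m mask : Nat) : (freeL m mask).Nodup := by
  have h1 : (freeN m mask).Nodup := List.Nodup.filter _ List.nodup_range
  exact List.Nodup.map (fun a b h => by exact_mod_cast h) h1

theorem omax_match (res X : Option Int) (c : Int) :
    (match X with
      | none => res
      | some sub =>
        match res with
        | none => some (c + sub)
        | some v => if c + sub > v then some (c + sub) else some v)
    = omax res (X.map (fun sub => c + sub)) := by
  cases X with
  | none => cases res <;> rfl
  | some sub =>
    cases res with
    | none => rfl
    | some v =>
      show (if c + sub > v then some (c + sub) else some v) = some (max v (c + sub))
      split_ifs with h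
      · rw [max_eq_right (le_of_lt h)]
      · rw [max_eq_left (by omega)]

theorem dp_invariant (m : Nat) (rows : List (List Int)) :
    ∀ mask, mask < 2 ^ m →
    (rows.foldr (fun row dp =>
      (List.range (1 <<< m)).map (fun mask =>
        if mask = (1 <<< m) - 1 then some (0:Int)
        else
          (List.range m).foldl (fun res j =>
            if mask.testBit j = false then
              match dp.getD (mask ||| (1 <<< j)) none with
              | none => res
              | some sub =>
                let cand := PySem.List.pyGetD row (j : Int) 0 + sub
                match res with
                | none => some cand
                | some v => if cand > v then some cand else some v
            else res) (dp.getD mask none)))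
      (List.replicate ((1 <<< m) - 1) none ++ [some 0])).getD mask none
    = G rows (freeL m mask) := by
  have hsz : (1 <<< m) = 2 ^ m := Nat.one_shiftLeft m
  induction rows with
  | nil =>
    intro mask hm
    simp only [List.foldr_nil]
    by_cases hfull : mask = 2 ^ m - 1
    · have hfl : freeL m mask = [] := by
        rw [freeL, (freeN_full_iff m mask hm).mpr hfull]; rfl
      rw [hfl, List.getD_eq_getElem?_getD, List.getElem?_append_right
        (by simp [List.length_replicate]; omega),
        show mask - (List.replicate ((1 <<< m) - 1) (none : Option Int)).length = 0 by
          simp [List.length_replicate]; omega]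
      rfl
    · have hfl : freeN m mask ≠ [] := fun hcon =>
        hfull ((freeN_full_iff m mask hm).mp hcon)
      rw [List.getD_eq_getElem?_getD, List.getElem?_append_left
        (by simp [List.length_replicate]; omega), List.getElem?_replicate]
      rw [if_pos (by omega)]
      cases hf : freeL m mask with
      | nil => exact absurd (List.map_eq_nil_iff.mp hf) hfl
      | cons e t => rfl
  | cons row rest ih =>
    intro mask hm
    simp only [List.foldr_cons]
    rw [List.getD_eq_getElem?_getD, List.getElem?_map,
      List.getElem?_range (by omega : mask < 1 <<< m)]
    simp only [Option.map_some, Option.getD_some]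
    by_cases hfull : mask = (1 <<< m) - 1
    · rw [if_pos hfull]
      have hfl : freeL m mask = [] := by
        rw [freeL, (freeN_full_iff m mask hm).mpr (by omega)]; rfl
      rw [hfl]; rfl
    · rw [if_neg hfull]
      have hfne : freeN m mask ≠ [] := fun hcon =>
        hfull (by rw [(freeN_full_iff m mask hm).mp hcon, hsz])
      have hLne : freeL m mask ≠ [] := fun h => hfne (List.map_eq_nil_iff.mp h)
      rw [G_cons_eq row rest (freeL m mask) hLne (freeL_nodup m mask)]
      -- turn the if-guarded fold into a fold over freeN
      rw [PySem.List.foldl_ite_eq_foldl_filter]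
      have hfilter : (List.range m).filter (fun j => decide (mask.testBit j = false))
          = freeN m mask := by
        rw [freeN]; apply List.filter_congr; intro x hx
        cases mask.testBit x <;> simp
      rw [hfilter]
      -- rewrite body using IH and the mask/list correspondence, then fold over the cast list
      rw [PySem.List.foldl_congr_mem (g := fun res j => omax res (Option.map
        (fun sub => PySem.List.pyGetD row ((j : Nat) : Int) 0 + sub)
        (G rest ((freeL m mask).erase ((j : Nat) : Int)))))]
      · rw [ih mask hm, freeL, List.foldl_map]
      · intro acc j hj
        have hjm : j < m := by
          have := List.mem_range.mp (List.mem_of_mem_filter hj)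
          exact this
        have hbit : mask.testBit j = false := by
          have := List.of_mem_filter hj
          simpa using this
        have hlt : mask ||| (1 <<< j) < 2 ^ m := by
          rw [Nat.one_shiftLeft]
          exact Nat.or_lt_two_pow hm (Nat.pow_lt_pow_right (by norm_num) hjm)
        rw [ih (mask ||| (1 <<< j)) hlt]
        rw [show freeL m (mask ||| (1 <<< j)) = (freeL m mask).erase ((j : Nat) : Int) by
          rw [freeL, freeN_or m mask j hjm hbit, freeL,
            List.map_erase (fun a b h => by exact_mod_cast h)]]
        exact omax_match acc _ _

-- ===== VERDICT (by name: the statement is the Claim_ definition above) =====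
theorem solution_alt_eq (ability : List (List Int)) :
    solution_alt ability
      = (if (PySem.List.pyGetD ability 0 []).length > ability.length then 0 else
          match (G ability (freeL ((PySem.List.pyGetD ability 0 []).length) 0)) with
          | none => 0
          | some r => max 0 r) := by
  unfold solution_alt
  by_cases hmn : (PySem.List.pyGetD ability 0 []).length > ability.length
  · rw [if_pos hmn, if_pos hmn]
  · rw [if_neg hmn, if_neg hmn]
    dsimp only
    rw [List.foldl_reverse]
    rw [dp_invariant ((PySem.List.pyGetD ability 0 []).length) ability 0
      (Nat.pow_pos (by norm_num))]

theorem solution_spec : Claim_equal_solution := by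
  intro ability _hdom _hpre
  unfold Spec_solution
  rw [solution_eq_oMaxList, solution_alt_eq]
  by_cases hmn : (PySem.List.pyGetD ability 0 []).length > ability.length
  · rw [if_pos hmn]
    rw [PySem.List.combinations_eq_nil_of_length_lt
      (xs := ability) (r := (PySem.List.pyGetD ability 0 []).length) (by omega)]
    rfl
  · rw [if_neg hmn]
    have hlen : (PySem.List.pyRange 0 (((PySem.List.pyGetD ability 0 []).length : Nat) : Int) 1).length
        = (PySem.List.pyGetD ability 0 []).length := by
      simp [PySem.List.length_pyRange_one]
    have hfl : freeL ((PySem.List.pyGetD ability 0 []).length) 0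
        = PySem.List.pyRange 0 (((PySem.List.pyGetD ability 0 []).length : Nat) : Int) 1 := by
      rw [freeL, freeN_zero, PySem.List.pyRange_zero_nat]
    rw [hfl, ← main_ident ability
      (PySem.List.pyRange 0 (((PySem.List.pyGetD ability 0 []).length : Nat) : Int) 1), hlen]
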